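-- pv_equiv track=rewrite | github.com/MVagor/lesson02 | module_2_hard.py | key
-- ===== SOURCE A (Python) =====
-- def key(x):
--     massiv = []
--     for i in range(1, x):
--         for j in range(i + 1, x):
--             if x % (i + j) == 0:
--                 massiv.append(i)
--                 massiv.append(j)
--     return massiv
-- ===== SOURCE B (Python) =====
-- def key(x):
--     # Sums i+j that contribute must be divisors of x; enumerate divisors once
--     # instead of testing every pair (i, j).
--     divs = [d for d in range(1, x + 1) if x % d == 0]
--     out = []
--     for i in range(1, x):
--         for d in divs:
--             if d > 2 * i:
--                 out.append(i)
--                 out.append(d - i)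
--     return out
-- ===== Notes on version B (the rewrite author's own statement) =====
-- stated objective: faster
-- what changed: B precomputes the sorted list of divisors of x once and, for each i, emits j = d - i for every divisor d exceeding twice i, replacing A's quadratic scan over all pairs (i, j) with a divisibility test on each.
import Mathlib
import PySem

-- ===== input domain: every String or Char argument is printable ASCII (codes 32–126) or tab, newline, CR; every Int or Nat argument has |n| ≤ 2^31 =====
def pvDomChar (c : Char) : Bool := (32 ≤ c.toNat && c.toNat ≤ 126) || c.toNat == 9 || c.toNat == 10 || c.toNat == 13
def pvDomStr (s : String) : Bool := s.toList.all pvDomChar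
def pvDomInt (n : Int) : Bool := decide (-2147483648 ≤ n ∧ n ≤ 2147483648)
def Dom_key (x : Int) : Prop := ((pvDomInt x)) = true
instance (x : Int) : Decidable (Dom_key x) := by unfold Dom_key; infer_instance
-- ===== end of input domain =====

-- B enumerates the divisors of x once and reads each j as d - i, replacing A's
-- quadratic scan over all pairs (i, j); objective: faster.

-- ===== PORT A =====
def key (x : Int) : List Int :=
  (PySem.List.pyRange 1 x 1).foldl (fun massiv i =>
    (PySem.List.pyRange (i + 1) x 1).foldl (fun massiv j =>
      if PySem.Int.mod x (i + j) == 0 then massiv ++ [i] ++ [j] else massiv) massiv) []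

-- ===== PORT B =====
def key_alt (x : Int) : List Int :=
  let divs := (PySem.List.pyRange 1 (x + 1) 1).filter (fun d => PySem.Int.mod x d == 0)
  (PySem.List.pyRange 1 x 1).foldl (fun out i =>
    divs.foldl (fun out d =>
      if d > 2 * i then out ++ [i] ++ [d - i] else out) out) []

-- ===== PRECONDITION & SPEC =====
def Spec_key (x : Int) (out : List Int) : Prop := out = key_alt x
instance (x : Int) (out : List Int) : Decidable (Spec_key x out) := by unfold Spec_key; infer_instance

-- ===== CLAIM (what is proved, stated in full; the proofs are below) =====
def Claim_equal_key : Prop := ∀ (x : Int), Dom_key x → Spec_key x (key x)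

-- ===== LEMMAS AND PROOFS =====

-- a 'flatMap with an if-else-[] body' is a flatMap over the filtered list
lemma flatMap_if_eq (l : List Int) (p : Int → Bool) (f : Int → List Int) :
    l.flatMap (fun a => if p a then f a else []) = (l.filter p).flatMap f := by
  induction l with
  | nil => rfl
  | cons a t ih => by_cases h : p a <;> simp [h, ih]

-- A's inner loop, as a flatMap over the j's whose sum with i divides x
lemma keyA_inner (x i : Int) (acc : List Int) :
    (PySem.List.pyRange (i + 1) x 1).foldl (fun massiv j =>
        if PySem.Int.mod x (i + j) == 0 then massiv ++ [i] ++ [j] else massiv) acc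
    = acc ++ ((PySem.List.pyRange (i + 1) x 1).filter
        (fun j => PySem.Int.mod x (i + j) == 0)).flatMap (fun j => [i, j]) := by
  rw [show (fun (massiv : List Int) j =>
        if PySem.Int.mod x (i + j) == 0 then massiv ++ [i] ++ [j] else massiv)
      = (fun massiv j => massiv ++ (if PySem.Int.mod x (i + j) == 0 then [i, j] else [])) from ?_]
  · rw [PySem.List.foldl_append_eq_flatMap, flatMap_if_eq]
  · funext a j; by_cases h : PySem.Int.mod x (i + j) == 0 <;> simp [h]

-- B's inner loop, as a flatMap over the divisors exceeding twice i
lemma keyB_inner (divs : List Int) (i : Int) (acc : List Int) :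
    divs.foldl (fun out d => if d > 2 * i then out ++ [i] ++ [d - i] else out) acc
    = acc ++ (divs.filter (fun d => decide (2 * i < d))).flatMap (fun d => [i, d - i]) := by
  rw [show (fun (out : List Int) d => if d > 2 * i then out ++ [i] ++ [d - i] else out)
      = (fun out d => out ++ (if decide (2 * i < d) then [i, d - i] else [])) from ?_]
  · rw [PySem.List.foldl_append_eq_flatMap, flatMap_if_eq]
  · funext a d; by_cases h : 2 * i < d <;> simp [h]

lemma keyA_flat (x : Int) :
    key x = (PySem.List.pyRange 1 x 1).flatMap (fun i =>
      ((PySem.List.pyRange (i + 1) x 1).filter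
        (fun j => PySem.Int.mod x (i + j) == 0)).flatMap (fun j => [i, j])) := by
  unfold key
  rw [show (fun (massiv : List Int) i => (PySem.List.pyRange (i + 1) x 1).foldl
        (fun massiv j => if PySem.Int.mod x (i + j) == 0 then massiv ++ [i] ++ [j] else massiv)
        massiv)
      = (fun massiv i => massiv ++ ((PySem.List.pyRange (i + 1) x 1).filter
          (fun j => PySem.Int.mod x (i + j) == 0)).flatMap (fun j => [i, j]))
    from funext fun massiv => funext fun i => keyA_inner x i massiv]
  rw [PySem.List.foldl_append_eq_flatMap]
  simp

lemma keyB_flat (x : Int) :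
    key_alt x = (PySem.List.pyRange 1 x 1).flatMap (fun i =>
      (((PySem.List.pyRange 1 (x + 1) 1).filter (fun d => PySem.Int.mod x d == 0)).filter
        (fun d => decide (2 * i < d))).flatMap (fun d => [i, d - i])) := by
  show (PySem.List.pyRange 1 x 1).foldl (fun out i =>
      ((PySem.List.pyRange 1 (x + 1) 1).filter (fun d => PySem.Int.mod x d == 0)).foldl
        (fun out d => if d > 2 * i then out ++ [i] ++ [d - i] else out) out) [] = _
  rw [show (fun (out : List Int) i =>
        ((PySem.List.pyRange 1 (x + 1) 1).filter (fun d => PySem.Int.mod x d == 0)).foldl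
          (fun out d => if d > 2 * i then out ++ [i] ++ [d - i] else out) out)
      = (fun out i => out ++ (((PySem.List.pyRange 1 (x + 1) 1).filter
          (fun d => PySem.Int.mod x d == 0)).filter
          (fun d => decide (2 * i < d))).flatMap (fun d => [i, d - i]))
    from funext fun out => funext fun i => keyB_inner _ i out]
  rw [PySem.List.foldl_append_eq_flatMap]
  simp

-- the sums i + j of A's inner loop are exactly the divisors of x exceeding twice i
lemma sums_eq_divs (x i : Int) (h1 : 1 ≤ i) (h2 : i < x) :
    ((PySem.List.pyRange (i + 1) x 1).filter
        (fun j => PySem.Int.mod x (i + j) == 0)).map (fun j => i + j)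
    = ((PySem.List.pyRange 1 (x + 1) 1).filter (fun d => PySem.Int.mod x d == 0)).filter
        (fun d => decide (2 * i < d)) := by
  have hx : (0 : Int) < x := by omega
  refine @List.Pairwise.eq_of_mem_iff _ (· < ·)
    ⟨fun a b hab hba => absurd (hab.trans hba) (lt_irrefl a)⟩ ⟨fun a => lt_irrefl a⟩
    _ _ ?_ ?_ ?_
  · exact (((PySem.List.pairwise_lt_pyRange_one _ _).filter _).map _
      (fun a b h => by omega))
  · exact ((PySem.List.pairwise_lt_pyRange_one _ _).filter _).filter _
  · intro a
    simp only [List.mem_map, List.mem_filter, PySem.List.mem_pyRange_one, beq_iff_eq,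
      decide_eq_true_eq, PySem.Int.mod_eq_zero_iff_dvd]
    constructor
    · rintro ⟨j, ⟨⟨hj1, hj2⟩, hdvd⟩, rfl⟩
      have hle : i + j ≤ x := Int.le_of_dvd hx hdvd
      exact ⟨⟨⟨by omega, by omega⟩, hdvd⟩, by omega⟩
    · rintro ⟨⟨⟨ha1, ha2⟩, hdvd⟩, hlt⟩
      refine ⟨a - i, ⟨⟨by omega, by omega⟩, ?_⟩, by omega⟩
      rwa [show i + (a - i) = a by omega]

lemma inner_lists_eq (x i : Int) (h1 : 1 ≤ i) (h2 : i < x) :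
    ((PySem.List.pyRange (i + 1) x 1).filter
        (fun j => PySem.Int.mod x (i + j) == 0)).flatMap (fun j => [i, j])
    = (((PySem.List.pyRange 1 (x + 1) 1).filter (fun d => PySem.Int.mod x d == 0)).filter
        (fun d => decide (2 * i < d))).flatMap (fun d => [i, d - i]) := by
  rw [← sums_eq_divs x i h1 h2, List.flatMap_map]
  congr 1
  funext j
  simp

-- ===== VERDICT (by name: the statement is the Claim_ definition above) =====
theorem key_spec : Claim_equal_key := by
  intro x _
  unfold Spec_key
  rw [keyA_flat, keyB_flat, List.flatMap_def, List.flatMap_def]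
  congr 1
  apply List.map_congr_left
  intro i hi
  rw [PySem.List.mem_pyRange_one] at hi
  exact inner_lists_eq x i hi.1 hi.2
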